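-- pv_equiv track=rewrite | github.com/adityajain1095/interview-practice | hackerrank.py | num_of_paths_to_dest
-- ===== SOURCE A (Python) =====
-- def num_of_paths_to_dest(n):
--     if not n:
--         return 0
--     if n <= 2:
--         return 1
--     matrix = [[0]*n for i in range(n)]
--     for i in range(n):
--         matrix[i][0] = 1
--     k = 2
--     for i in range(n-2,-1,-1):
--         for j in range(1,k):
--             matrix[i][j] += matrix[i+1][j] + matrix[i][j-1]
--         k+=1
--     return matrix[0][-2]
-- ===== SOURCE B (Python) =====
-- def num_of_paths_to_dest(n):
--     # Catalan number C(n-1) via the exact product recurrence, O(n) instead of the O(n^2) grid DP.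
--     if not n:
--         return 0
--     if n <= 2:
--         return 1
--     c = 1
--     for i in range(n - 1):
--         c = c * (2 * (2 * i + 1)) // (i + 2)
--     return c
-- ===== Notes on version B (the rewrite author's own statement) =====
-- stated objective: faster
-- what changed: Replaces the O(n^2) lattice-path grid DP (an n-by-n matrix filled row by row) with the O(n) exact integer product recurrence for the Catalan number C(n-1), c -> c*2*(2i+1)//(i+2).
import Mathlib
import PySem

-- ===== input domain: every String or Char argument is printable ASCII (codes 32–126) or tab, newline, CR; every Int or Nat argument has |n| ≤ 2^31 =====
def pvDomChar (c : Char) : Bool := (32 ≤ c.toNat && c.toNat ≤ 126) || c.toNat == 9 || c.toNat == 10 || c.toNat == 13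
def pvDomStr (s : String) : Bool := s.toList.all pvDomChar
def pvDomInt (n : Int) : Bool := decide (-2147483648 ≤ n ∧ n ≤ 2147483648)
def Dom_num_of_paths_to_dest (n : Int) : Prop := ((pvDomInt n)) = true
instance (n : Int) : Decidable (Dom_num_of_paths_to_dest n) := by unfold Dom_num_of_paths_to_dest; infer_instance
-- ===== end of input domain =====

-- B replaces A's O(n^2) grid DP by the O(n) exact Catalan product recurrence (measured faster).


-- ===== PORT A =====
-- helper: the body of 'matrix[i][0] = 1' for one i of the first loop
def pvColInit (m : List (List Int)) (i : Int) : List (List Int) :=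
  PySem.List.pySetD m i (PySem.List.pySetD (PySem.List.pyGetD m i []) 0 1)

-- helper: the body of the inner 'for j in range(1, k)' loop (i fixed)
def pvInner (i : Int) (m : List (List Int)) (j : Int) : List (List Int) :=
  PySem.List.pySetD m i
    (PySem.List.pySetD (PySem.List.pyGetD m i []) j
      (PySem.List.pyGetD (PySem.List.pyGetD m i []) j 0 +
        (PySem.List.pyGetD (PySem.List.pyGetD m (i + 1) []) j 0 +
          PySem.List.pyGetD (PySem.List.pyGetD m i []) (j - 1) 0)))

-- helper: the body of the outer 'for i in range(n-2, -1, -1)' loop; state = (matrix, k)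
def pvOuter (st : List (List Int) × Int) (i : Int) : List (List Int) × Int :=
  ((PySem.List.pyRange 1 st.2 1).foldl (pvInner i) st.1, st.2 + 1)

def num_of_paths_to_dest (n : Int) : Int :=
  if n = 0 then 0
  else if n ≤ 2 then 1
  else
    let matrix : List (List Int) :=
      (PySem.List.pyRange 0 n 1).map (fun _ => PySem.List.pyRepeat [(0 : Int)] n)
    let matrix : List (List Int) := (PySem.List.pyRange 0 n 1).foldl pvColInit matrix
    let st : List (List Int) × Int :=
      (PySem.List.pyRange (n - 2) (-1) (-1)).foldl pvOuter (matrix, 2)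
    PySem.List.pyGetD (PySem.List.pyGetD st.1 0 []) (-2) 0

-- ===== PORT B =====
def num_of_paths_to_dest_alt (n : Int) : Int :=
  if n = 0 then 0
  else if n ≤ 2 then 1
  else
    (PySem.List.pyRange 0 (n - 1) 1).foldl
      (fun c i => PySem.Int.floordiv (c * (2 * (2 * i + 1))) (i + 2)) 1

-- ===== PRECONDITION & SPEC =====
def Spec_num_of_paths_to_dest (n : Int) (out : Int) : Prop := out = num_of_paths_to_dest_alt n
instance (n : Int) (out : Int) : Decidable (Spec_num_of_paths_to_dest n out) := by unfold Spec_num_of_paths_to_dest; infer_instance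

-- ===== CLAIM (what is proved, stated in full; the proofs are below) =====
def Claim_equal_num_of_paths_to_dest : Prop := ∀ (n : Int), Dom_num_of_paths_to_dest n → Spec_num_of_paths_to_dest n (num_of_paths_to_dest n)

-- ===== LEMMAS AND PROOFS =====

-- ballot-number DP: bal a j = #monotone lattice paths to (a, j) staying weakly below the diagonal
def bal : Nat → Nat → Nat
  | _, 0 => 1
  | 0, _+1 => 0
  | a+1, j+1 => if j + 1 ≤ a + 1 then bal a (j+1) + bal (a+1) j else 0

lemma bal_zero_of_lt : ∀ a j : Nat, a < j → bal a j = 0 := by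
  intro a j h
  match a, j, h with
  | 0, k+1, _ => simp [bal]
  | a+1, j+1, h => simp only [bal, if_neg (by omega : ¬ (j + 1 ≤ a + 1))]

def balRow (N a : Nat) : List Int := (List.range N).map (fun j => (bal a j : Int))

def balPart (N a t : Nat) : List Int :=
  (List.range N).map (fun j => if j ≤ t then (bal a j : Int) else 0)

-- matrix state with rows ≥ c finished, rows < c still column-0-only
def balMat (N c : Nat) : List (List Int) :=
  (List.range N).map (fun r => balRow N (if c ≤ r then N - 1 - r else 0))

lemma set_map_range {α : Type} (N r : Nat) (_hr : r < N) (g : Nat → α) (v : α) :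
    ((List.range N).map g).set r v = (List.range N).map (fun x => if x = r then v else g x) := by
  apply List.ext_getElem (by simp)
  intro i h1 h2
  simp only [List.getElem_set, List.getElem_map, List.getElem_range]
  have h2' : i < N := by simpa using h2
  by_cases h3 : r = i
  · simp [h3]
  · rw [if_neg h3, if_neg (by omega : ¬ i = r)]

lemma getD_map_range' {α : Type} (N k : Nat) (hk : k < N) (g : Nat → α) (d : α) :
    ((List.range N).map g).getD k d = g k := by
  simp [List.getD_eq_getElem?_getD, hk]

lemma bal_closed : ∀ a j : Nat, 1 ≤ j → j ≤ a + 1 →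
    (bal a j : Int) = ((a + j).choose j : Int) - ((a + j).choose (j - 1) : Int) := by
  intro a
  induction a with
  | zero =>
    intro j h1 h2
    interval_cases j
    simp [bal]
  | succ a ih =>
    intro j
    induction j with
    | zero => omega
    | succ j ihj =>
      intro _ hle
      by_cases h : j + 1 ≤ a + 1
      · rcases Nat.eq_zero_or_pos j with hj0 | hj1
        · subst hj0
          have hb : bal (a + 1) 1 = bal a 1 + 1 := by simp [bal]
          have ha1 := ih 1 (by omega) (by omega)
          rw [hb]
          push_cast
          rw [ha1]
          simp [Nat.choose_one_right]
        · obtain ⟨j', rfl⟩ : ∃ j', j = j' + 1 := ⟨j - 1, by omega⟩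
          have hb : bal (a + 1) (j' + 2) = bal a (j' + 2) + bal (a + 1) (j' + 1) := by
            simp only [bal, if_pos h]
          have e1 := ih (j' + 2) (by omega) (by omega)
          have e2 := ihj (by omega) (by omega)
          have hi1 : a + (j' + 2) = a + j' + 2 := by omega
          have hi2 : a + 1 + (j' + 1) = a + j' + 2 := by omega
          have hi3 : a + 1 + (j' + 2) = a + j' + 3 := by omega
          rw [hi1] at e1; rw [hi2] at e2; rw [hi3]
          have p1 : (a + j' + 3).choose (j' + 2) = (a + j' + 2).choose (j' + 1) + (a + j' + 2).choose (j' + 2) :=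
            Nat.choose_succ_succ' (a + j' + 2) (j' + 1)
          have p2 : (a + j' + 3).choose (j' + 1) = (a + j' + 2).choose j' + (a + j' + 2).choose (j' + 1) :=
            Nat.choose_succ_succ' (a + j' + 2) j'
          rw [hb]
          push_cast
          rw [e1]
          simp only [Nat.add_sub_cancel] at e2 ⊢
          rw [e2, p1, p2]
          push_cast
          ring
      · have hj : j = a + 1 := by omega
        subst hj
        have hb : bal (a + 1) (a + 2) = 0 := bal_zero_of_lt _ _ (by omega)
        have p2 : (a + 1 + (a + 2)).choose (a + 2) = (a + 1 + (a + 2)).choose (a + 1) := by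
          have hs := Nat.choose_symm (show a + 1 ≤ a + 1 + (a + 2) by omega)
          have h1 : a + 1 + (a + 2) - (a + 1) = a + 2 := by omega
          rw [h1] at hs
          exact hs
        rw [hb]
        simp only [Nat.add_sub_cancel]
        rw [p2]
        simp

lemma bal_diag (m : Nat) (hm : 1 ≤ m) : (bal (m + 1) m : Int) = (catalan (m + 1) : Int) := by
  have e := bal_closed (m + 1) m hm (by omega)
  have hidx : m + 1 + m = 2 * m + 1 := by omega
  rw [hidx] at e
  have p1 : (2 * m + 1).choose m * m = (2 * m + 1).choose (m - 1) * (m + 2) := by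
    have hp := Nat.choose_succ_right_eq (2 * m + 1) (m - 1)
    have h1 : m - 1 + 1 = m := by omega
    have h2 : 2 * m + 1 - (m - 1) = m + 2 := by omega
    rw [h1, h2] at hp
    exact hp
  have p2 : (2 * m + 1).choose (m + 1) = (2 * m + 1).choose m := by
    have hs := Nat.choose_symm (show m ≤ 2 * m + 1 by omega)
    have h1 : 2 * m + 1 - m = m + 1 := by omega
    rw [h1] at hs
    exact hs
  have p3 : (2 * m + 2).choose (m + 1) = (2 * m + 1).choose m + (2 * m + 1).choose (m + 1) :=
    Nat.choose_succ_succ' (2 * m + 1) m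
  have p4 : (m + 2) * catalan (m + 1) = (2 * m + 2).choose (m + 1) := by
    have hc := succ_mul_catalan_eq_centralBinom (m + 1)
    simpa [Nat.centralBinom, show 2 * (m + 1) = 2 * m + 2 from by omega] using hc
  have p1z : ((2 * m + 1).choose m : Int) * m = ((2 * m + 1).choose (m - 1) : Int) * (m + 2) := by
    exact_mod_cast p1
  have p2z : ((2 * m + 1).choose (m + 1) : Int) = ((2 * m + 1).choose m : Int) := by exact_mod_cast p2
  have p3z : ((2 * m + 2).choose (m + 1) : Int) = ((2 * m + 1).choose m : Int) + ((2 * m + 1).choose (m + 1) : Int) := by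
    exact_mod_cast p3
  have p4z : ((m : Int) + 2) * (catalan (m + 1) : Int) = ((2 * m + 2).choose (m + 1) : Int) := by
    exact_mod_cast p4
  refine mul_left_cancel₀ (show ((m : Int) + 2) ≠ 0 by positivity) ?_
  rw [e]
  linear_combination p1z - p2z - p3z - p4z

lemma catalan_step (t : Nat) : 2 * (2 * t + 1) * catalan t = (t + 2) * catalan (t + 1) := by
  have h1 := succ_mul_catalan_eq_centralBinom t
  have h2 := succ_mul_catalan_eq_centralBinom (t + 1)
  have h3 := Nat.succ_mul_centralBinom_succ t
  have key : (t + 1) * (2 * (2 * t + 1) * catalan t) = (t + 1) * ((t + 2) * catalan (t + 1)) := by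
    calc (t + 1) * (2 * (2 * t + 1) * catalan t)
        = 2 * (2 * t + 1) * ((t + 1) * catalan t) := by ring
      _ = 2 * (2 * t + 1) * t.centralBinom := by rw [h1]
      _ = (t + 1) * (t + 1).centralBinom := h3.symm
      _ = (t + 1) * ((t + 2) * catalan (t + 1)) := by rw [h2]
  exact Nat.eq_of_mul_eq_mul_left (by omega) key

lemma bfold (m : Nat) :
    (PySem.List.pyRange 0 (m : Int) 1).foldl
      (fun c i => PySem.Int.floordiv (c * (2 * (2 * i + 1))) (i + 2)) 1 = (catalan m : Int) := by
  induction m with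
  | zero => simp [PySem.List.pyRange_one_eq_nil]
  | succ m ih =>
    have hcast : ((m : Int) + 1) = ((m + 1 : Nat) : Int) := by push_cast; ring
    rw [show ((m + 1 : Nat) : Int) = (m : Int) + 1 by push_cast; ring,
        PySem.List.pyRange_one_succ_right (by positivity : (0:Int) ≤ (m:Int)), List.foldl_append, ih]
    simp only [List.foldl_cons, List.foldl_nil]
    have h1 : (catalan m : Int) * (2 * (2 * (m : Int) + 1)) = ((2 * (2 * m + 1) * catalan m : Nat) : Int) := by
      push_cast; ring
    have h2 : (m : Int) + 2 = ((m + 2 : Nat) : Int) := by push_cast; ring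
    rw [h1, h2, PySem.Int.floordiv_natCast, catalan_step m, Nat.mul_div_cancel_left _ (by omega)]

lemma row0 (N : Nat) : (List.replicate N (0 : Int)).set 0 1 = balRow N 0 := by
  apply List.ext_getElem (by simp [balRow])
  intro i h1 h2
  simp only [List.getElem_set, List.getElem_replicate, balRow, List.getElem_map, List.getElem_range]
  rcases i with _ | i <;> simp [bal]

lemma colinit_aux (N : Nat) : ∀ t : Nat, t ≤ N →
    (PySem.List.pyRange 0 (t : Int) 1).foldl pvColInit
        ((List.range N).map (fun _ => List.replicate N (0 : Int)))
      = (List.range N).map (fun r => if r < t then balRow N 0 else List.replicate N (0 : Int)) := by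
  intro t
  induction t with
  | zero =>
    intro _
    rw [show ((0 : Nat) : Int) = 0 from rfl, PySem.List.pyRange_one_eq_nil le_rfl]
    simp
  | succ t ih =>
    intro ht
    rw [show ((t + 1 : Nat) : Int) = (t : Int) + 1 by push_cast; ring,
        PySem.List.pyRange_one_succ_right (by positivity : (0 : Int) ≤ (t : Int)),
        List.foldl_append, ih (by omega)]
    simp only [List.foldl_cons, List.foldl_nil]
    unfold pvColInit
    have htN : t < N := by omega
    have hget : PySem.List.pyGetD
        ((List.range N).map (fun r => if r < t then balRow N 0 else List.replicate N (0 : Int)))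
        (t : Int) [] = List.replicate N (0 : Int) := by
      rw [PySem.List.pyGetD_natCast, getD_map_range' N t htN]
      simp
    rw [hget, PySem.List.pySetD_of_nonneg _ _ (by positivity : (0 : Int) ≤ (t : Int))]
    rw [PySem.List.pySetD_of_nonneg _ _ (by norm_num : (0 : Int) ≤ 0)]
    simp only [Int.toNat_natCast, Int.toNat_zero]
    rw [row0, set_map_range N t htN]
    apply List.map_congr_left
    intro x hx
    simp only [List.mem_range] at hx
    by_cases h1 : x = t
    · simp [h1]
    · rw [if_neg h1]
      by_cases h2 : x < t
      · rw [if_pos h2, if_pos (by omega)]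
      · rw [if_neg h2, if_neg (by omega)]

lemma inner_fold (N c : Nat) (_hN : 3 ≤ N) (hc : c ≤ N - 2) : ∀ t : Nat, t ≤ N - 1 - c →
    (PySem.List.pyRange 1 ((t : Int) + 1) 1).foldl (pvInner (c : Int)) (balMat N (c + 1))
      = (List.range N).map (fun r =>
          if r = c then balPart N (N - 1 - c) t
          else balRow N (if c + 1 ≤ r then N - 1 - r else 0)) := by
  intro t
  induction t with
  | zero =>
    intro _
    rw [show (((0 : Nat)) : Int) + 1 = 1 by norm_num, PySem.List.pyRange_one_eq_nil le_rfl]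
    simp only [List.foldl_nil]
    unfold balMat
    apply List.map_congr_left
    intro r hr
    by_cases h1 : r = c
    · rw [if_pos h1, h1, if_neg (by omega : ¬ (c + 1 ≤ c))]
      unfold balRow balPart
      apply List.map_congr_left
      intro j hj
      rcases j with _ | j
      · simp [bal]
      · rw [if_neg (by omega : ¬ (j + 1 ≤ 0)), bal_zero_of_lt 0 (j + 1) (by omega)]
        simp
    · rw [if_neg h1]
  | succ t ih =>
    intro ht
    have hcN : c < N := by omega
    have ha1 : 1 ≤ N - 1 - c := by omega
    have htN : t + 1 < N := by omega
    rw [show ((t + 1 : Nat) : Int) + 1 = ((t : Int) + 1) + 1 by push_cast; ring,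
        PySem.List.pyRange_one_succ_right (by omega : (1 : Int) ≤ (t : Int) + 1),
        List.foldl_append, ih (by omega)]
    simp only [List.foldl_cons, List.foldl_nil]
    unfold pvInner
    have hrowc : PySem.List.pyGetD
        ((List.range N).map (fun r => if r = c then balPart N (N - 1 - c) t
          else balRow N (if c + 1 ≤ r then N - 1 - r else 0))) (c : Int) [] = balPart N (N - 1 - c) t := by
      rw [PySem.List.pyGetD_natCast, getD_map_range' N c hcN]
      simp
    have hrowc1 : PySem.List.pyGetD
        ((List.range N).map (fun r => if r = c then balPart N (N - 1 - c) t
          else balRow N (if c + 1 ≤ r then N - 1 - r else 0))) ((c : Int) + 1) [] = balRow N (N - 1 - c - 1) := by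
      rw [show ((c : Int) + 1) = ((c + 1 : Nat) : Int) by push_cast; ring,
          PySem.List.pyGetD_natCast, getD_map_range' N (c + 1) (by omega)]
      rw [if_neg (by omega : ¬ (c + 1 = c)), if_pos le_rfl,
          show N - 1 - (c + 1) = N - 1 - c - 1 by omega]
    have hgetP : ∀ s : Nat, s < N → PySem.List.pyGetD (balPart N (N - 1 - c) t) ((s : Nat) : Int) 0
        = (if s ≤ t then (bal (N - 1 - c) s : Int) else 0) := by
      intro s hs
      rw [PySem.List.pyGetD_natCast]
      unfold balPart
      rw [getD_map_range' N s hs]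
    have hgetR : PySem.List.pyGetD (balRow N (N - 1 - c - 1)) (((t + 1 : Nat) : Nat) : Int) 0
        = (bal (N - 1 - c - 1) (t + 1) : Int) := by
      rw [PySem.List.pyGetD_natCast]
      unfold balRow
      rw [getD_map_range' N (t + 1) htN]
    rw [hrowc, hrowc1]
    rw [show ((t : Int) + 1) = ((t + 1 : Nat) : Int) by push_cast; ring]
    rw [show ((t + 1 : Nat) : Int) - 1 = ((t : Nat) : Int) by push_cast; ring]
    rw [hgetP (t + 1) htN, hgetP t (by omega), hgetR]
    rw [if_neg (by omega : ¬ (t + 1 ≤ t)), if_pos le_rfl]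
    have hbal : (0 : Int) + ((bal (N - 1 - c - 1) (t + 1) : Int) + (bal (N - 1 - c) t : Int))
        = (bal (N - 1 - c) (t + 1) : Int) := by
      obtain ⟨a', ha'⟩ : ∃ a', N - 1 - c = a' + 1 := ⟨N - 1 - c - 1, by omega⟩
      rw [ha', show a' + 1 - 1 = a' by omega]
      rw [show bal (a' + 1) (t + 1) = bal a' (t + 1) + bal (a' + 1) t by
            simp only [bal, if_pos (by omega : t + 1 ≤ a' + 1)]]
      push_cast
      ring
    rw [hbal]
    rw [PySem.List.pySetD_of_nonneg _ _ (by positivity : (0 : Int) ≤ ((t + 1 : Nat) : Int)),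
        Int.toNat_natCast]
    rw [PySem.List.pySetD_of_nonneg _ _ (by positivity : (0 : Int) ≤ ((c : Nat) : Int)),
        Int.toNat_natCast]
    unfold balPart
    rw [set_map_range N (t + 1) htN, set_map_range N c hcN]
    apply List.map_congr_left
    intro x hx
    by_cases h1 : x = c
    · subst h1
      rw [if_pos rfl, if_pos rfl]
      apply List.map_congr_left
      intro j hj
      by_cases h2 : j = t + 1
      · rw [if_pos h2, h2, if_pos le_rfl]
      · rw [if_neg h2]
        by_cases h3 : j ≤ t
        · rw [if_pos h3, if_pos (by omega)]
        · rw [if_neg h3, if_neg (by omega)]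
    · rw [if_neg h1, if_neg h1, if_neg h1]

lemma outer_fold (N : Nat) (hN : 3 ≤ N) : ∀ c : Nat, c ≤ N - 1 →
    ((PySem.List.pyRange ((c : Int) - 1) (-1) (-1)).foldl pvOuter
        (balMat N c, (N : Int) - c + 1)).1 = balMat N 0 := by
  intro c
  induction c with
  | zero =>
    intro _
    rw [show ((0 : Nat) : Int) - 1 = -1 by norm_num, PySem.List.pyRange_neg_one_eq_nil le_rfl]
    simp
  | succ c ih =>
    intro hc
    rw [show ((c + 1 : Nat) : Int) - 1 = (c : Int) by push_cast; ring,
        PySem.List.pyRange_neg_one_cons (by omega : (-1 : Int) < (c : Int))]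
    simp only [List.foldl_cons]
    have hstep : pvOuter (balMat N (c + 1), (N : Int) - ((c + 1 : Nat) : Int) + 1) (c : Int)
        = (balMat N c, (N : Int) - (c : Int) + 1) := by
      unfold pvOuter
      have h2 : (N : Int) - ((c + 1 : Nat) : Int) + 1 = ((N - 1 - c : Nat) : Int) + 1 := by
        push_cast
        omega
      refine Prod.ext ?_ ?_
      · simp only []
        rw [h2, inner_fold N c hN (by omega) (N - 1 - c) le_rfl]
        unfold balMat
        apply List.map_congr_left
        intro r hr
        by_cases h1 : r = c
        · rw [if_pos h1, h1, if_pos le_rfl]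
          unfold balPart balRow
          apply List.map_congr_left
          intro j hj
          by_cases h3 : j ≤ N - 1 - c
          · rw [if_pos h3]
          · rw [if_neg h3, bal_zero_of_lt (N - 1 - c) j (by omega)]
            simp
        · rw [if_neg h1]
          by_cases h4 : c + 1 ≤ r
          · rw [if_pos h4, if_pos (by omega)]
          · rw [if_neg h4, if_neg (by omega)]
      · simp only []
        push_cast
        ring
    rw [hstep]
    exact ih (by omega)

-- ===== VERDICT (by name: the statement is the Claim_ definition above) =====
theorem num_of_paths_to_dest_spec : Claim_equal_num_of_paths_to_dest := by
  intro n _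
  unfold Spec_num_of_paths_to_dest
  by_cases h0 : n = 0
  · simp [num_of_paths_to_dest, num_of_paths_to_dest_alt, h0]
  · by_cases h2 : n ≤ 2
    · simp [num_of_paths_to_dest, num_of_paths_to_dest_alt, h0, h2]
    · obtain ⟨N, rfl⟩ : ∃ N : Nat, n = (N : Int) := ⟨n.toNat, by omega⟩
      have hN : 3 ≤ N := by omega
      simp only [num_of_paths_to_dest, num_of_paths_to_dest_alt, if_neg h0, if_neg h2]
      have hinit : (PySem.List.pyRange 0 ((N : Nat) : Int) 1).map
            (fun _ => PySem.List.pyRepeat [(0 : Int)] ((N : Nat) : Int))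
          = (List.range N).map (fun _ => List.replicate N (0 : Int)) := by
        rw [PySem.List.pyRange_one, List.map_map]
        simp [PySem.List.pyRepeat_singleton, Function.comp_def, List.map_const']
      rw [hinit, colinit_aux N N le_rfl]
      have hcol : (List.range N).map
            (fun r => if r < N then balRow N 0 else List.replicate N (0 : Int))
          = balMat N (N - 1) := by
        unfold balMat
        apply List.map_congr_left
        intro r hr
        simp only [List.mem_range] at hr
        rw [if_pos hr]
        congr 1
        by_cases h : N - 1 ≤ r
        · rw [if_pos h]
          omega
        · rw [if_neg h]
      rw [hcol]
      have hout := outer_fold N hN (N - 1) le_rfl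
      rw [show ((N - 1 : Nat) : Int) - 1 = ((N : Nat) : Int) - 2 by omega,
          show ((N : Nat) : Int) - ((N - 1 : Nat) : Int) + 1 = (2 : Int) by omega] at hout
      rw [hout]
      have hrow0 : PySem.List.pyGetD (balMat N 0) 0 [] = balRow N (N - 1) := by
        rw [show (0 : Int) = ((0 : Nat) : Int) from rfl, PySem.List.pyGetD_natCast]
        unfold balMat
        rw [getD_map_range' N 0 (by omega)]
        simp
      rw [hrow0]
      have hlen : (balRow N (N - 1)).length = N := by simp [balRow]
      rw [PySem.List.pyGetD_neg_ofNat (balRow N (N - 1)) 2 0 (by omega) (by omega)]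
      have hval : (balRow N (N - 1))[(balRow N (N - 1)).length - 2]'(by omega)
          = (bal (N - 1) (N - 2) : Int) := by
        unfold balRow
        simp only [List.getElem_map, List.getElem_range, List.length_map, List.length_range]
      rw [hval]
      rw [show ((N : Nat) : Int) - 1 = ((N - 1 : Nat) : Int) by omega, bfold (N - 1)]
      have hd := bal_diag (N - 2) (by omega)
      rw [show N - 2 + 1 = N - 1 by omega] at hd
      exact hd
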